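-- pv_equiv track=rewrite | github.com/do0134/crow_study | joo/0524/pro_리코쳇로봇.py | solution
-- ===== SOURCE A (Python) =====
-- from collections import deque
--
-- def solution(board):
--     length = len(board)
--     width = len(board[0])
--     answer = 0
--     dd = [(0, 1), (1, 0), (0, -1), (-1, 0)]
--     ri, rj = 0, 0
--     for i in range(length):
--         for j in range(width):
--             if board[i][j] == "R":
--                 ri, rj = i, j
--
--     def bfs(x, y):
--         q = deque()
--         q.append((x, y))
--         visited = [[0] * width for _ in range(length)]
--         visited[x][y] = 1
--
--         while q:
--             px, py = q.popleft()
--             if board[px][py] == "G":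
--                 return visited[px][py]
--             for di, dj in dd:
--                 nx, ny = px, py
--                 while True:
--                     nx, ny = nx + di, ny + dj
--                     if 0 <= nx < length and 0 <= ny < width and board[nx][ny] == "D":
--                         nx -= di
--                         ny -= dj
--                         break
--                     if nx < 0 or nx >= length or ny < 0 or ny >= width:
--                         nx -= di
--                         ny -= dj
--                         break
--                 if not visited[nx][ny]:
--                     visited[nx][ny] = visited[px][py] + 1
--                     q.append((nx, ny))
--         return -1
--
--     answer = bfs(ri, rj)
--     if answer > 0:
--         answer -= 1
--
--     return answer
-- ===== SOURCE B (Python) =====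
-- from collections import deque
--
-- def solution(board):
--     L, W = len(board), len(board[0])
--     ri = rj = 0
--     for i in range(L):
--         for j in range(W):
--             if board[i][j] == "R":
--                 ri, rj = i, j
--     # precompute slide-landing per cell and direction by four linear sweeps
--     right = [[0] * W for _ in range(L)]
--     left = [[0] * W for _ in range(L)]
--     down = [[0] * W for _ in range(L)]
--     up = [[0] * W for _ in range(L)]
--     for i in range(L):
--         row = board[i]
--         for j in range(W - 1, -1, -1):
--             right[i][j] = j if j + 1 >= W or row[j + 1] == 'D' else right[i][j + 1]
--         for j in range(W):
--             left[i][j] = j if j == 0 or row[j - 1] == 'D' else left[i][j - 1]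
--     for j in range(W):
--         for i in range(L - 1, -1, -1):
--             down[i][j] = i if i + 1 >= L or board[i + 1][j] == 'D' else down[i + 1][j]
--         for i in range(L):
--             up[i][j] = i if i == 0 or board[i - 1][j] == 'D' else up[i - 1][j]
--     dist = [[-1] * W for _ in range(L)]
--     dist[ri][rj] = 0
--     q = deque([(ri, rj)])
--     while q:
--         x, y = q.popleft()
--         if board[x][y] == 'G':
--             return dist[x][y]
--         for nx, ny in ((x, right[x][y]), (down[x][y], y), (x, left[x][y]), (up[x][y], y)):
--             if dist[nx][ny] == -1:
--                 dist[nx][ny] = dist[x][y] + 1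
--                 q.append((nx, ny))
--     return -1
-- ===== Notes on version B (the rewrite author's own statement) =====
-- stated objective: alternative
-- what changed: The per-move inner while-loops that slide the robot cell by cell are replaced by four landing tables precomputed with linear row/column sweeps, so each BFS transition becomes an O(1) table lookup; the distance map stores distances directly (start 0) instead of A's visited counter that is decremented at the end.
import Mathlib
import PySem

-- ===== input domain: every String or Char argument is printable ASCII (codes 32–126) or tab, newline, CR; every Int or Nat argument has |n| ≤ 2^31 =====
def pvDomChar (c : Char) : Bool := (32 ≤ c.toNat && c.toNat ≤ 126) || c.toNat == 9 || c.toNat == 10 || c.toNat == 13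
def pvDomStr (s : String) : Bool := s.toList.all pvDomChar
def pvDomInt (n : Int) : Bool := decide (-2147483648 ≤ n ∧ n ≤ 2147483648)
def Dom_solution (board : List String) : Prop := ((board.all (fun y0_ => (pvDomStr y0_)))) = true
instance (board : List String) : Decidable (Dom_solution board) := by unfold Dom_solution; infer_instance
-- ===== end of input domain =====

-- B replaces A's per-move cell-by-cell slide loops with landing tables precomputed by
-- linear sweeps, so each BFS transition is a table lookup (objective: alternative algorithm).

-- ===== PORT A =====
-- board[i][j]; under Pre_solution every access made by either Python is in range, so the
-- default ' ' is never read.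
def pvGetC (board : List String) (i j : Nat) : Char :=
  ((board.getD i "").toList).getD j ' '

def pvDD : List (Int × Int) := [(0, 1), (1, 0), (0, -1), (-1, 0)]

-- the inner `while True` slide; fuel L+W bounds the number of one-cell steps, which from an
-- in-range start is at most max(L,W), so the fuel never runs out on inputs A accepts
def pvSlideA (L W : Nat) (board : List String) (di dj : Int) : Nat → Int → Int → Int × Int
  | 0, x, y => (x, y)
  | f + 1, x, y =>
    let nx := x + di
    let ny := y + dj
    if nx < 0 ∨ (L : Int) ≤ nx ∨ ny < 0 ∨ (W : Int) ≤ ny ∨ pvGetC board nx.toNat ny.toNat = 'D'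
    then (x, y)
    else pvSlideA L W board di dj f nx ny

-- `if not visited[nx][ny]: visited[nx][ny] = visited[px][py] + 1; q.append((nx, ny))`
-- (the visited matrix is represented as a function; all reads/writes are at in-range cells)
def pvMarkA (px py : Nat) (s : List (Nat × Nat) × (Nat → Nat → Int)) (n : Nat × Nat) :
    List (Nat × Nat) × (Nat → Nat → Int) :=
  if s.2 n.1 n.2 = 0 then
    (s.1 ++ [n], fun a b => if a = n.1 ∧ b = n.2 then s.2 px py + 1 else s.2 a b)
  else s

-- the `while q` loop; fuel L*W+1 bounds the number of pops (1 + at most L*W-1 appends),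
-- so the fuel never runs out on inputs A accepts
def pvBfsA (L W : Nat) (board : List String) :
    Nat → List (Nat × Nat) → (Nat → Nat → Int) → Int
  | 0, _, _ => -1
  | _ + 1, [], _ => -1
  | f + 1, p :: q, vis =>
    if pvGetC board p.1 p.2 = 'G' then vis p.1 p.2
    else
      let st := pvDD.foldl
        (fun s d =>
          pvMarkA p.1 p.2 s
            (let n := pvSlideA L W board d.1 d.2 (L + W) (p.1 : Int) (p.2 : Int)
             (n.1.toNat, n.2.toNat)))
        (q, vis)
      pvBfsA L W board f st.1 st.2

-- the double scan for the last 'R' (both Pythons contain this same scan)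
def pvFindR (board : List String) (L W : Nat) : Nat × Nat :=
  (List.range L).foldl
    (fun p i => (List.range W).foldl
      (fun p' j => if pvGetC board i j = 'R' then (i, j) else p') p)
    (0, 0)

def solution (board : List String) : Int :=
  let L := board.length
  let W := (board.headD "").toList.length
  let rp := pvFindR board L W
  let answer := pvBfsA L W board (L * W + 1) [rp]
    (fun a b => if a = rp.1 ∧ b = rp.2 then 1 else 0)
  if answer > 0 then answer - 1 else answer

-- ===== PORT B =====
-- `for j in range(W-1,-1,-1): right[j] = j if j+1 >= W or g(j+1)=='D' else right[j+1]`
-- (the table row is represented as a function built by the same descending sweep)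
def pvSweepR (g : Nat → Char) (W : Nat) : Nat → Nat :=
  (List.range W).foldr
    (fun j t => fun k => if k = j then (if W ≤ j + 1 ∨ g (j + 1) = 'D' then j else t (j + 1)) else t k)
    (fun _ => 0)

-- `for j in range(W): left[j] = j if j == 0 or g(j-1)=='D' else left[j-1]`
def pvSweepL (g : Nat → Char) (W : Nat) : Nat → Nat :=
  (List.range W).foldl
    (fun t j => fun k => if k = j then (if j = 0 ∨ g (j - 1) = 'D' then j else t (j - 1)) else t k)
    (fun _ => 0)

-- the 4-tuple ((x,right[x][y]), (down[x][y],y), (x,left[x][y]), (up[x][y],y))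
def pvNbr (board : List String) (L W : Nat) (x y : Nat) : List (Nat × Nat) :=
  [(x, pvSweepR (fun j => pvGetC board x j) W y),
   (pvSweepR (fun i => pvGetC board i y) L x, y),
   (x, pvSweepL (fun j => pvGetC board x j) W y),
   (pvSweepL (fun i => pvGetC board i y) L x, y)]

-- `if dist[nx][ny] == -1: dist[nx][ny] = dist[x][y] + 1; q.append((nx, ny))`
def pvMarkB (x y : Nat) (s : List (Nat × Nat) × (Nat → Nat → Int)) (n : Nat × Nat) :
    List (Nat × Nat) × (Nat → Nat → Int) :=
  if s.2 n.1 n.2 = -1 then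
    (s.1 ++ [n], fun a b => if a = n.1 ∧ b = n.2 then s.2 x y + 1 else s.2 a b)
  else s

-- B's `while q` loop over precomputed transitions (same fuel bound as A's)
def pvBfsB (board : List String) (nbr : Nat → Nat → List (Nat × Nat)) :
    Nat → List (Nat × Nat) → (Nat → Nat → Int) → Int
  | 0, _, _ => -1
  | _ + 1, [], _ => -1
  | f + 1, p :: q, dist =>
    if pvGetC board p.1 p.2 = 'G' then dist p.1 p.2
    else
      let st := (nbr p.1 p.2).foldl (pvMarkB p.1 p.2) (q, dist)
      pvBfsB board nbr f st.1 st.2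

def solution_alt (board : List String) : Int :=
  let L := board.length
  let W := (board.headD "").toList.length
  let rp := pvFindR board L W
  pvBfsB board (pvNbr board L W) (L * W + 1) [rp]
    (fun a b => if a = rp.1 ∧ b = rp.2 then 0 else -1)

-- ===== PRECONDITION & SPEC =====
-- Pre_ excludes exactly the inputs on which the Python A raises IndexError: the empty board,
-- a zero-width first row, and boards with a row shorter than the first row.
def Pre_solution (board : List String) : Prop :=
  board ≠ [] ∧ 0 < (board.headD "").toList.length ∧
    ∀ s ∈ board, (board.headD "").toList.length ≤ s.toList.length

instance (board : List String) : Decidable (Pre_solution board) := by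
  unfold Pre_solution; infer_instance

def pvWitness_solution : List String := (["RG"])

def Spec_solution (board : List String) (out : Int) : Prop := out = solution_alt board
instance (board : List String) (out : Int) : Decidable (Spec_solution board out) := by
  unfold Spec_solution; infer_instance

-- ===== CLAIM (what is proved, stated in full; the proofs are below) =====
def Claim_equal_solution : Prop :=
  ∀ (board : List String), Dom_solution board → Pre_solution board →
    Spec_solution board (solution board)

-- ===== LEMMAS AND PROOFS =====

-- recursive characterisations of the slide destination (proof-only helpers)
def pvSlideRspec (g : Nat → Char) (W : Nat) (j : Nat) : Nat :=
  if W ≤ j + 1 ∨ g (j + 1) = 'D' then j else pvSlideRspec g W (j + 1)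
termination_by W - j
decreasing_by omega

def pvSlideLspec (g : Nat → Char) : Nat → Nat
  | 0 => 0
  | j + 1 => if g j = 'D' then j + 1 else pvSlideLspec g j

theorem pvSlideRspec_lt (g : Nat → Char) (W : Nat) :
    ∀ j, j < W → pvSlideRspec g W j < W := by
  intro j
  induction j using pvSlideRspec.induct g W with
  | case1 j h => intro hj; rw [pvSlideRspec, if_pos h]; exact hj
  | case2 j h ih =>
    intro _; rw [pvSlideRspec, if_neg h]; exact ih (by omega)

theorem pvSlideLspec_le (g : Nat → Char) : ∀ j, pvSlideLspec g j ≤ j := by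
  intro j
  induction j with
  | zero => simp [pvSlideLspec]
  | succ j ih =>
    rw [pvSlideLspec]
    split
    · omega
    · omega


-- sweep tables compute the recursive slide destinations
theorem pvSweepR_aux (g : Nat → Char) (W : Nat) :
    ∀ k m, m + k = W → ∀ j, m ≤ j → j < W →
      ((List.range' m k).foldr
        (fun j t => fun k' => if k' = j then (if W ≤ j + 1 ∨ g (j + 1) = 'D' then j else t (j + 1)) else t k')
        (fun _ => 0)) j = pvSlideRspec g W j := by
  intro k
  induction k with
  | zero => intro m hm j h1 h2; omega
  | succ k ih =>
    intro m hm j h1 h2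
    rw [List.range'_succ]
    simp only [List.foldr_cons]
    by_cases hjm : j = m
    · subst hjm
      rw [pvSlideRspec]
      simp only [if_true]
      by_cases hstop : W ≤ j + 1 ∨ g (j + 1) = 'D'
      · rw [if_pos hstop, if_pos hstop]
      · rw [if_neg hstop, if_neg hstop]
        exact ih (j + 1) (by omega) (j + 1) le_rfl (by omega)
    · simp only [if_neg hjm]
      exact ih (m + 1) (by omega) j (by omega) h2

theorem pvSweepR_eq (g : Nat → Char) (W : Nat) (j : Nat) (h : j < W) :
    pvSweepR g W j = pvSlideRspec g W j := by
  unfold pvSweepR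
  rw [List.range_eq_range']
  exact pvSweepR_aux g W W 0 (by omega) j (by omega) h

theorem pvSweepL_aux (g : Nat → Char) :
    ∀ m j, j < m →
      ((List.range m).foldl
        (fun t j => fun k => if k = j then (if j = 0 ∨ g (j - 1) = 'D' then j else t (j - 1)) else t k)
        (fun _ => 0)) j = pvSlideLspec g j := by
  intro m
  induction m with
  | zero => intro j h; omega
  | succ m ih =>
    intro j h
    rw [List.range_succ, List.foldl_append]
    simp only [List.foldl_cons, List.foldl_nil]
    by_cases hjm : j = m
    · subst hjm
      simp only [if_true]
      cases j with
      | zero => simp [pvSlideLspec]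
      | succ j' =>
        rw [pvSlideLspec]
        by_cases hD : g j' = 'D'
        · simp [hD]
        · simp [hD]
          exact ih j' (by omega)
    · simp only [if_neg hjm]
      exact ih j (by omega)

theorem pvSweepL_eq (g : Nat → Char) (W : Nat) (j : Nat) (h : j < W) :
    pvSweepL g W j = pvSlideLspec g j := by
  unfold pvSweepL
  exact pvSweepL_aux g W j h

-- the inline while-loop slides equal the recursive slide destinations (four directions)
theorem pvSlideA_right (L W : Nat) (board : List String) (i : Nat) (hi : i < L) :
    ∀ f j, j < W → W - j ≤ f →
      pvSlideA L W board 0 1 f (i : Int) (j : Int) =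
        ((i : Int), ((pvSlideRspec (fun j' => pvGetC board i j') W j : Nat) : Int)) := by
  intro f
  induction f with
  | zero => intro j hj hf; omega
  | succ f ih =>
    intro j hj hf
    simp only [pvSlideA]
    have e1 : (i : Int) + 0 = (i : Int) := by ring
    have e2 : ((j : Int) + 1) = ((j + 1 : Nat) : Int) := by push_cast; ring
    rw [e1, e2, Int.toNat_natCast, Int.toNat_natCast]
    have hc : ((i : Int) < 0 ∨ (L : Int) ≤ (i : Int) ∨ ((j + 1 : Nat) : Int) < 0 ∨
        (W : Int) ≤ ((j + 1 : Nat) : Int) ∨ pvGetC board i (j + 1) = 'D') ↔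
        (W ≤ j + 1 ∨ pvGetC board i (j + 1) = 'D') := by
      constructor
      · rintro (h | h | h | h | h)
        · exact absurd h (by omega)
        · exact absurd h (by omega)
        · exact absurd h (by omega)
        · left; exact_mod_cast h
        · right; exact h
      · rintro (h | h)
        · right; right; right; left; exact_mod_cast h
        · right; right; right; right; exact h
    rw [if_congr hc rfl rfl, pvSlideRspec]
    by_cases hstop : W ≤ j + 1 ∨ pvGetC board i (j + 1) = 'D'
    · rw [if_pos hstop, if_pos hstop]
    · rw [if_neg hstop, if_neg hstop]
      exact ih (j + 1) (by omega) (by omega)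

theorem pvSlideA_left (L W : Nat) (board : List String) (i : Nat) (hi : i < L) :
    ∀ f j, j < W → j + 1 ≤ f →
      pvSlideA L W board 0 (-1) f (i : Int) (j : Int) =
        ((i : Int), ((pvSlideLspec (fun j' => pvGetC board i j') j : Nat) : Int)) := by
  intro f
  induction f with
  | zero => intro j hj hf; omega
  | succ f ih =>
    intro j hj hf
    simp only [pvSlideA]
    have e1 : (i : Int) + 0 = (i : Int) := by ring
    rw [e1]
    cases j with
    | zero =>
      have hlt : ((0 : Nat) : Int) + (-1) < 0 := by norm_num
      rw [if_pos (Or.inr (Or.inr (Or.inl hlt)))]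
      simp [pvSlideLspec]
    | succ j' =>
      have e2 : ((j' + 1 : Nat) : Int) + (-1) = ((j' : Nat) : Int) := by push_cast; ring
      rw [e2, Int.toNat_natCast, Int.toNat_natCast]
      have hc : ((i : Int) < 0 ∨ (L : Int) ≤ (i : Int) ∨ ((j' : Nat) : Int) < 0 ∨
          (W : Int) ≤ ((j' : Nat) : Int) ∨ pvGetC board i j' = 'D') ↔
          (pvGetC board i j' = 'D') := by
        constructor
        · rintro (h | h | h | h | h)
          · exact absurd h (by omega)
          · exact absurd h (by omega)
          · exact absurd h (by omega)
          · exact absurd h (by omega)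
          · exact h
        · intro h; right; right; right; right; exact h
      rw [if_congr hc rfl rfl, pvSlideLspec]
      by_cases hD : pvGetC board i j' = 'D'
      · rw [if_pos hD, if_pos hD]
      · rw [if_neg hD, if_neg hD]
        exact ih j' (by omega) (by omega)

theorem pvSlideA_down (L W : Nat) (board : List String) (j : Nat) (hj : j < W) :
    ∀ f i, i < L → L - i ≤ f →
      pvSlideA L W board 1 0 f (i : Int) (j : Int) =
        (((pvSlideRspec (fun i' => pvGetC board i' j) L i : Nat) : Int), (j : Int)) := by
  intro f
  induction f with
  | zero => intro i hi hf; omega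
  | succ f ih =>
    intro i hi hf
    simp only [pvSlideA]
    have e1 : (j : Int) + 0 = (j : Int) := by ring
    have e2 : ((i : Int) + 1) = ((i + 1 : Nat) : Int) := by push_cast; ring
    rw [e1, e2, Int.toNat_natCast, Int.toNat_natCast]
    have hc : (((i + 1 : Nat) : Int) < 0 ∨ (L : Int) ≤ ((i + 1 : Nat) : Int) ∨
        (j : Int) < 0 ∨ (W : Int) ≤ (j : Int) ∨ pvGetC board (i + 1) j = 'D') ↔
        (L ≤ i + 1 ∨ pvGetC board (i + 1) j = 'D') := by
      constructor
      · rintro (h | h | h | h | h)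
        · exact absurd h (by omega)
        · left; exact_mod_cast h
        · exact absurd h (by omega)
        · exact absurd h (by omega)
        · right; exact h
      · rintro (h | h)
        · right; left; exact_mod_cast h
        · right; right; right; right; exact h
    rw [if_congr hc rfl rfl, pvSlideRspec]
    by_cases hstop : L ≤ i + 1 ∨ pvGetC board (i + 1) j = 'D'
    · rw [if_pos hstop, if_pos hstop]
    · rw [if_neg hstop, if_neg hstop]
      exact ih (i + 1) (by omega) (by omega)

theorem pvSlideA_up (L W : Nat) (board : List String) (j : Nat) (hj : j < W) :
    ∀ f i, i < L → i + 1 ≤ f →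
      pvSlideA L W board (-1) 0 f (i : Int) (j : Int) =
        (((pvSlideLspec (fun i' => pvGetC board i' j) i : Nat) : Int), (j : Int)) := by
  intro f
  induction f with
  | zero => intro i hi hf; omega
  | succ f ih =>
    intro i hi hf
    simp only [pvSlideA]
    have e1 : (j : Int) + 0 = (j : Int) := by ring
    rw [e1]
    cases i with
    | zero =>
      have hlt : ((0 : Nat) : Int) + (-1) < 0 := by norm_num
      rw [if_pos (Or.inl hlt)]
      simp [pvSlideLspec]
    | succ i' =>
      have e2 : ((i' + 1 : Nat) : Int) + (-1) = ((i' : Nat) : Int) := by push_cast; ring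
      rw [e2, Int.toNat_natCast, Int.toNat_natCast]
      have hc : (((i' : Nat) : Int) < 0 ∨ (L : Int) ≤ ((i' : Nat) : Int) ∨
          (j : Int) < 0 ∨ (W : Int) ≤ (j : Int) ∨ pvGetC board i' j = 'D') ↔
          (pvGetC board i' j = 'D') := by
        constructor
        · rintro (h | h | h | h | h)
          · exact absurd h (by omega)
          · exact absurd h (by omega)
          · exact absurd h (by omega)
          · exact absurd h (by omega)
          · exact h
        · intro h; right; right; right; right; exact h
      rw [if_congr hc rfl rfl, pvSlideLspec]
      by_cases hD : pvGetC board i' j = 'D'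
      · rw [if_pos hD, if_pos hD]
      · rw [if_neg hD, if_neg hD]
        exact ih i' (by omega) (by omega)

-- the four precomputed landings at an in-range cell are exactly A's four slide results
theorem pvMapSlide_eq (L W : Nat) (board : List String) (x y : Nat) (hx : x < L) (hy : y < W) :
    pvDD.map (fun d =>
      (let n := pvSlideA L W board d.1 d.2 (L + W) (x : Int) (y : Int); (n.1.toNat, n.2.toNat)))
      = pvNbr board L W x y := by
  simp only [pvDD, List.map_cons, List.map_nil]
  rw [pvSlideA_right L W board x hx (L + W) y hy (by omega),
    pvSlideA_down L W board y hy (L + W) x hx (by omega),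
    pvSlideA_left L W board x hx (L + W) y hy (by omega),
    pvSlideA_up L W board y hy (L + W) x hx (by omega)]
  simp only [Int.toNat_natCast, pvNbr]
  rw [pvSweepR_eq _ _ _ hy, pvSweepR_eq _ _ _ hx, pvSweepL_eq _ _ _ hy, pvSweepL_eq _ _ _ hx]

theorem pvNbr_mem_range (L W : Nat) (board : List String) (x y : Nat) (hx : x < L) (hy : y < W) :
    ∀ n ∈ pvNbr board L W x y, n.1 < L ∧ n.2 < W := by
  intro n hn
  have hr1 : pvSweepR (fun j => pvGetC board x j) W y < W := by
    rw [pvSweepR_eq _ _ _ hy]; exact pvSlideRspec_lt _ _ y hy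
  have hr2 : pvSweepR (fun i => pvGetC board i y) L x < L := by
    rw [pvSweepR_eq _ _ _ hx]; exact pvSlideRspec_lt _ _ x hx
  have hl1 : pvSweepL (fun j => pvGetC board x j) W y < W := by
    rw [pvSweepL_eq _ _ _ hy]
    exact lt_of_le_of_lt (pvSlideLspec_le _ y) hy
  have hl2 : pvSweepL (fun i => pvGetC board i y) L x < L := by
    rw [pvSweepL_eq _ _ _ hx]
    exact lt_of_le_of_lt (pvSlideLspec_le _ x) hx
  simp only [pvNbr, List.mem_cons, List.not_mem_nil, or_false] at hn
  rcases hn with h | h | h | h <;> subst h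
  · exact ⟨hx, hr1⟩
  · exact ⟨hr2, hy⟩
  · exact ⟨hx, hl1⟩
  · exact ⟨hl2, hy⟩

-- relation between A's state (visited counter, start 1) and B's state (distance map, start 0)
def pvRel (sA sB : List (Nat × Nat) × (Nat → Nat → Int)) : Prop :=
  sA.1 = sB.1 ∧ ∀ a b, sB.2 a b = sA.2 a b - 1

def pvGood (L W px py : Nat) (s : List (Nat × Nat) × (Nat → Nat → Int)) : Prop :=
  (∀ p ∈ s.1, p.1 < L ∧ p.2 < W ∧ 1 ≤ s.2 p.1 p.2) ∧ 1 ≤ s.2 px py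

theorem pvMark_pres (L W px py : Nat)
    (s s' : List (Nat × Nat) × (Nat → Nat → Int)) (n : Nat × Nat)
    (hn1 : n.1 < L) (hn2 : n.2 < W)
    (hrel : pvRel s s') (hgood : pvGood L W px py s) :
    pvRel (pvMarkA px py s n) (pvMarkB px py s' n) ∧
      pvGood L W px py (pvMarkA px py s n) := by
  unfold pvRel at hrel
  unfold pvGood at hgood
  unfold pvRel pvGood
  obtain ⟨hq, hv⟩ := hrel
  obtain ⟨hmem, hpp⟩ := hgood
  unfold pvMarkA pvMarkB
  by_cases h0 : s.2 n.1 n.2 = 0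
  · have h1 : s'.2 n.1 n.2 = -1 := by rw [hv]; omega
    rw [if_pos h0, if_pos h1]
    have hne : ¬(px = n.1 ∧ py = n.2) := by
      rintro ⟨e1, e2⟩
      rw [e1, e2] at hpp
      omega
    refine ⟨⟨?_, ?_⟩, ?_, ?_⟩
    · dsimp only
      rw [hq]
    · intro a b
      dsimp only
      by_cases hab : a = n.1 ∧ b = n.2
      · rw [if_pos hab, if_pos hab, hv px py]
        ring
      · rw [if_neg hab, if_neg hab]
        exact hv a b
    · intro r hr
      dsimp only at hr ⊢
      rcases List.mem_append.mp hr with hr | hr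
      · obtain ⟨b1, b2, b3⟩ := hmem r hr
        refine ⟨b1, b2, ?_⟩
        have hrn : ¬(r.1 = n.1 ∧ r.2 = n.2) := by
          rintro ⟨e1, e2⟩
          rw [e1, e2] at b3
          omega
        rw [if_neg hrn]
        exact b3
      · have hrn : r = n := by simpa using hr
        subst hrn
        refine ⟨hn1, hn2, ?_⟩
        rw [if_pos ⟨rfl, rfl⟩]
        omega
    · dsimp only
      rw [if_neg hne]
      exact hpp
  · have h1 : ¬ s'.2 n.1 n.2 = -1 := by rw [hv]; omega
    rw [if_neg h0, if_neg h1]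
    exact ⟨⟨hq, hv⟩, hmem, hpp⟩

theorem pvFold_pres (L W px py : Nat) :
    ∀ (ns : List (Nat × Nat)) (s s' : List (Nat × Nat) × (Nat → Nat → Int)),
      (∀ n ∈ ns, n.1 < L ∧ n.2 < W) → pvRel s s' → pvGood L W px py s →
      pvRel (ns.foldl (pvMarkA px py) s) (ns.foldl (pvMarkB px py) s') ∧
        pvGood L W px py (ns.foldl (pvMarkA px py) s) := by
  intro ns
  induction ns with
  | nil => intro s s' _ h1 h2; exact ⟨h1, h2⟩
  | cons n ns ih =>
    intro s s' hns h1 h2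
    simp only [List.foldl_cons]
    obtain ⟨hr, hg⟩ := pvMark_pres L W px py s s' n (hns n (by simp)).1
      (hns n (by simp)).2 h1 h2
    exact ih _ _ (fun m hm => hns m (by simp [hm])) hr hg

theorem pvFoldA_eq_map (L W : Nat) (board : List String) (px py : Nat)
    (s0 : List (Nat × Nat) × (Nat → Nat → Int)) :
    pvDD.foldl (fun s d => pvMarkA px py s
      (let n := pvSlideA L W board d.1 d.2 (L + W) (px : Int) (py : Int);
        (n.1.toNat, n.2.toNat))) s0
    = (pvDD.map (fun d =>
        (let n := pvSlideA L W board d.1 d.2 (L + W) (px : Int) (py : Int);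
          (n.1.toNat, n.2.toNat)))).foldl (pvMarkA px py) s0 := by
  rw [List.foldl_map]

-- A's queue-BFS with visited counters and B's queue-BFS with precomputed transitions agree
theorem pvBfs_rel (L W : Nat) (board : List String) :
    ∀ (f : Nat) (q : List (Nat × Nat)) (vis dist : Nat → Nat → Int),
      (∀ p ∈ q, p.1 < L ∧ p.2 < W ∧ 1 ≤ vis p.1 p.2) →
      (∀ a b, dist a b = vis a b - 1) →
      pvBfsB board (pvNbr board L W) f q dist =
        (if pvBfsA L W board f q vis > 0 then pvBfsA L W board f q vis - 1
         else pvBfsA L W board f q vis) := by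
  intro f
  induction f with
  | zero =>
    intro q vis dist _ _
    simp only [pvBfsA, pvBfsB]
    norm_num
  | succ f ih =>
    intro q vis dist hq hd
    cases q with
    | nil =>
      simp only [pvBfsA, pvBfsB]
      norm_num
    | cons p q =>
      simp only [pvBfsA, pvBfsB]
      by_cases hg : pvGetC board p.1 p.2 = 'G'
      · rw [if_pos hg, if_pos hg]
        have h1 : 1 ≤ vis p.1 p.2 := (hq p (by simp)).2.2
        rw [hd p.1 p.2, if_pos (by omega)]
      · rw [if_neg hg, if_neg hg]
        have hx := (hq p (by simp)).1
        have hy := (hq p (by simp)).2.1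
        rw [pvFoldA_eq_map L W board p.1 p.2 (q, vis),
          pvMapSlide_eq L W board p.1 p.2 hx hy]
        have hnb := pvNbr_mem_range L W board p.1 p.2 hx hy
        have h0 : pvRel (q, vis) (q, dist) := ⟨rfl, hd⟩
        have hgood0 : pvGood L W p.1 p.2 (q, vis) :=
          ⟨fun r hr => hq r (by simp [hr]), (hq p (by simp)).2.2⟩
        obtain ⟨⟨hq', hv'⟩, hg1, hg2⟩ :=
          pvFold_pres L W p.1 p.2 (pvNbr board L W p.1 p.2) (q, vis) (q, dist) hnb h0 hgood0
        rw [← hq']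
        exact ih _ _ _ hg1 hv'

theorem pvFindR_range (board : List String) (L W : Nat) (hL : 0 < L) (hW : 0 < W) :
    (pvFindR board L W).1 < L ∧ (pvFindR board L W).2 < W := by
  unfold pvFindR
  have inner : ∀ (i : Nat), i < L → ∀ (lj : List Nat), (∀ j ∈ lj, j < W) →
      ∀ acc : Nat × Nat, acc.1 < L → acc.2 < W →
      ((lj.foldl (fun p' j => if pvGetC board i j = 'R' then (i, j) else p') acc).1 < L ∧
        (lj.foldl (fun p' j => if pvGetC board i j = 'R' then (i, j) else p') acc).2 < W) := by
    intro i hi lj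
    induction lj with
    | nil => intro _ acc h1 h2; exact ⟨h1, h2⟩
    | cons j lj ih =>
      intro hmem acc h1 h2
      simp only [List.foldl_cons]
      by_cases hR : pvGetC board i j = 'R'
      · rw [if_pos hR]
        exact ih (fun m hm => hmem m (by simp [hm])) (i, j) hi (hmem j (by simp))
      · rw [if_neg hR]
        exact ih (fun m hm => hmem m (by simp [hm])) acc h1 h2
  have outer : ∀ (li : List Nat), (∀ i ∈ li, i < L) →
      ∀ acc : Nat × Nat, acc.1 < L → acc.2 < W →
      (((li.foldl (fun p i => (List.range W).foldl
          (fun p' j => if pvGetC board i j = 'R' then (i, j) else p') p) acc)).1 < L ∧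
        ((li.foldl (fun p i => (List.range W).foldl
          (fun p' j => if pvGetC board i j = 'R' then (i, j) else p') p) acc)).2 < W) := by
    intro li
    induction li with
    | nil => intro _ acc h1 h2; exact ⟨h1, h2⟩
    | cons i li ih =>
      intro hmem acc h1 h2
      simp only [List.foldl_cons]
      have h := inner i (hmem i (by simp)) (List.range W)
        (fun j hj => List.mem_range.mp hj) acc h1 h2
      exact ih (fun m hm => hmem m (by simp [hm])) _ h.1 h.2
  exact outer (List.range L) (fun i hi => List.mem_range.mp hi) (0, 0) hL hW

theorem pv_main (board : List String) (hpre : Pre_solution board) :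
    solution board = solution_alt board := by
  obtain ⟨hne, hW, hrows⟩ := hpre
  have hL : 0 < board.length := by
    cases board with
    | nil => exact absurd rfl hne
    | cons a l => simp
  simp only [solution, solution_alt]
  have hr := pvFindR_range board board.length (board.headD "").toList.length hL hW
  symm
  refine pvBfs_rel board.length (board.headD "").toList.length board
    (board.length * (board.headD "").toList.length + 1) _ _ _ ?_ ?_
  · intro p hp
    have hp' : p = pvFindR board board.length (board.headD "").toList.length := by
      simpa using hp
    subst hp'
    exact ⟨hr.1, hr.2, by rw [if_pos ⟨rfl, rfl⟩]⟩
  · intro a b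
    split_ifs <;> norm_num

-- ===== VERDICT (by name: the statement is the Claim_ definition above) =====
theorem solution_spec : Claim_equal_solution := by
  unfold Claim_equal_solution
  intro board _ hpre
  unfold Spec_solution
  exact pv_main board hpre
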